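-- pv_equiv track=rewrite | github.com/isrusin/rebase | scripts/select_uniq.py | load_seqs
-- ===== SOURCE A (Python) =====
-- def add_seq(nm, seq, seqs):
--     if nm is None:
--         return False
--     seqs.setdefault(seq, set()).add(nm)
--     return True
--
-- def load_seqs(infasta):
--     seqs = dict()
--     nm = None
--     seq = []
--     for line in infasta:
--         if line.startswith(">"):
--             add_seq(nm, "".join(seq), seqs)
--             nm = line.split()[0].lstrip(">")
--             seq = []
--         else:
--             seq.append(line.strip())
--     add_seq(nm, "".join(seq), seqs)
--     return seqs
-- ===== SOURCE B (Python) =====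
-- def load_seqs(infasta):
--     seqs = dict()
--     n = len(infasta)
--     i = 0
--     # skip prologue lines before the first header
--     while i < n and not infasta[i].startswith(">"):
--         i += 1
--     # consume one whole record (header + body block) per iteration
--     while i < n:
--         name = infasta[i].split()[0].lstrip(">")
--         parts = []
--         j = i + 1
--         while j < n and not infasta[j].startswith(">"):
--             parts.append(infasta[j].strip())
--             j += 1
--         seqs.setdefault("".join(parts), set()).add(name)
--         i = j
--     return seqs
-- ===== Notes on version B (the rewrite author's own statement) =====
-- stated objective: alternative
-- what changed: Replaced A's streaming state machine (carry name/accumulator, flush the previous record on each header and once after the loop) by a record-at-a-time parser that skips the prologue and then repeatedly consumes one header plus its whole body block.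
import Mathlib
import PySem

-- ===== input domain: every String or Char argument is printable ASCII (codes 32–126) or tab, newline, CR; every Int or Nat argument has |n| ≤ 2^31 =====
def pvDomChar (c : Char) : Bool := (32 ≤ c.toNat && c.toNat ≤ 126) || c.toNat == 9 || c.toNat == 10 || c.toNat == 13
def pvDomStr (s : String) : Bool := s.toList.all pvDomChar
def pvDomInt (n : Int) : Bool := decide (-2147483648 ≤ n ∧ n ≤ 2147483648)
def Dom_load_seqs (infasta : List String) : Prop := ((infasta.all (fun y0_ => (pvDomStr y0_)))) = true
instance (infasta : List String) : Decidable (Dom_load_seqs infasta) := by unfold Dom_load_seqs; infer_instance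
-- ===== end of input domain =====

-- B replaces A's flush-on-header streaming state machine by a record-at-a-time parser
-- (skip prologue, then consume one header + body block per step); same cost, different
-- decomposition. (Python A mutates no caller-visible argument.)

-- name = line.split()[0].lstrip(">"); line starts with ">", so split() is nonempty and
-- [0] is its head; lstrip(">") drops the leading '>' characters (exact, ported by hand).
def pvName (line : String) : String :=
  String.ofList (((PySem.Str.split₀ line).headD "").toList.dropWhile (fun c => c == '>'))

-- ===== PORT A =====
-- add_seq(nm, seq, seqs): seqs.setdefault(seq, set()).add(nm) when nm is not None
def pvAddSeq (nm : Option String) (seq : String)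
    (seqs : PySem.Dict String (PySem.Set String)) : PySem.Dict String (PySem.Set String) :=
  match nm with
  | none => seqs
  | some n => seqs.modify seq PySem.Set.empty (fun s => PySem.Set.add s n)

-- one iteration of A's for-loop; state = (seqs, nm, seq)
def pvStepA (st : PySem.Dict String (PySem.Set String) × Option String × List String)
    (line : String) : PySem.Dict String (PySem.Set String) × Option String × List String :=
  if PySem.Str.startswith line ">" then
    (pvAddSeq st.2.1 (PySem.Str.join "" st.2.2) st.1, some (pvName line), [])
  else
    (st.1, st.2.1, st.2.2 ++ [PySem.Str.strip line])

def load_seqs (infasta : List String) : List (String × List String) :=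
  let st := infasta.foldl pvStepA (PySem.Dict.empty, none, [])
  (pvAddSeq st.2.1 (PySem.Str.join "" st.2.2) st.1).items

-- ===== PORT B =====
-- inner while loop: stripped body lines until the next header, and the remaining lines
def pvBody : List String → List String × List String
  | [] => ([], [])
  | l :: rest =>
    if PySem.Str.startswith l ">" then ([], l :: rest)
    else
      let br := pvBody rest
      (PySem.Str.strip l :: br.1, br.2)

theorem pvBody_len (ls : List String) : (pvBody ls).2.length ≤ ls.length := by
  induction ls with
  | nil => simp [pvBody]
  | cons l rest ih =>
    simp only [pvBody]
    split
    · simp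
    · simpa using Nat.le_succ_of_le ih

-- outer while loop: one record (header + body block) per iteration
def pvRecs (seqs : PySem.Dict String (PySem.Set String)) :
    List String → PySem.Dict String (PySem.Set String)
  | [] => seqs
  | l :: rest =>
    let name := pvName l
    let br := pvBody rest
    pvRecs (seqs.modify (PySem.Str.join "" br.1) PySem.Set.empty
      (fun s => PySem.Set.add s name)) br.2
termination_by ls => ls.length
decreasing_by exact Nat.lt_succ_of_le (pvBody_len rest)

def load_seqs_alt (infasta : List String) : List (String × List String) :=
  (pvRecs PySem.Dict.empty
    (infasta.dropWhile (fun l => !PySem.Str.startswith l ">"))).items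

-- ===== PRECONDITION & SPEC =====
def Spec_load_seqs (infasta : List String) (out : List (String × List String)) : Prop := out = load_seqs_alt infasta
instance (infasta : List String) (out : List (String × List String)) : Decidable (Spec_load_seqs infasta out) := by unfold Spec_load_seqs; infer_instance

-- ===== CLAIM (what is proved, stated in full; the proofs are below) =====
def Claim_equal_load_seqs : Prop := ∀ (infasta : List String), Dom_load_seqs infasta → Spec_load_seqs infasta (load_seqs infasta)

-- ===== LEMMAS AND PROOFS =====

-- A's final flush applied to a loop state
def pvFinish (st : PySem.Dict String (PySem.Set String) × Option String × List String) :
    PySem.Dict String (PySem.Set String) :=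
  pvAddSeq st.2.1 (PySem.Str.join "" st.2.2) st.1

theorem pvStepA_header {l : String} (h : PySem.Str.startswith l ">" = true)
    (st : PySem.Dict String (PySem.Set String) × Option String × List String) :
    pvStepA st l = (pvAddSeq st.2.1 (PySem.Str.join "" st.2.2) st.1, some (pvName l), []) := by
  simp only [pvStepA, h, reduceIte]

theorem pvStepA_body {l : String} (h : PySem.Str.startswith l ">" = false)
    (st : PySem.Dict String (PySem.Set String) × Option String × List String) :
    pvStepA st l = (st.1, st.2.1, st.2.2 ++ [PySem.Str.strip l]) := by
  simp only [pvStepA, h, Bool.false_eq_true, reduceIte]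

theorem pvBody_cons_header {l : String} (h : PySem.Str.startswith l ">" = true)
    (t : List String) : pvBody (l :: t) = ([], l :: t) := by
  simp only [pvBody, h, reduceIte]

theorem pvBody_cons_body {l : String} (h : PySem.Str.startswith l ">" = false)
    (t : List String) :
    pvBody (l :: t) = (PySem.Str.strip l :: (pvBody t).1, (pvBody t).2) := by
  simp only [pvBody, h, Bool.false_eq_true, reduceIte]

theorem pvRecs_nil (d : PySem.Dict String (PySem.Set String)) : pvRecs d [] = d := by
  rw [pvRecs]

theorem pvRecs_cons (d : PySem.Dict String (PySem.Set String)) (l : String)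
    (rest : List String) :
    pvRecs d (l :: rest) =
      pvRecs (d.modify (PySem.Str.join "" (pvBody rest).1) PySem.Set.empty
        (fun s => PySem.Set.add s (pvName l))) (pvBody rest).2 := by
  rw [pvRecs]

-- in-record invariant: from a state carrying a name, A's remaining fold produces
-- exactly what B produces from the current record's tail
theorem pvMain (rest : List String) :
    ∀ (d : PySem.Dict String (PySem.Set String)) (name : String) (acc : List String),
    pvFinish (rest.foldl pvStepA (d, some name, acc)) =
      pvRecs (d.modify (PySem.Str.join "" (acc ++ (pvBody rest).1)) PySem.Set.empty
        (fun s => PySem.Set.add s name)) (pvBody rest).2 := by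
  induction rest with
  | nil =>
    intro d name acc
    simp [pvBody, pvRecs_nil, pvFinish, pvAddSeq]
  | cons l t ih =>
    intro d name acc
    cases h : PySem.Str.startswith l ">" with
    | true =>
      rw [List.foldl_cons, pvStepA_header h, pvBody_cons_header h]
      simp only [pvAddSeq]
      rw [ih, pvRecs_cons]
      simp
    | false =>
      rw [List.foldl_cons, pvStepA_body h, pvBody_cons_body h]
      rw [ih]
      simp

-- prologue invariant: with nm = None the accumulated seq is discarded and A's fold
-- equals B's parse of the input with the prologue dropped
theorem pvPrologue (ls : List String) :
    ∀ (d : PySem.Dict String (PySem.Set String)) (acc : List String),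
    pvFinish (ls.foldl pvStepA (d, none, acc)) =
      pvRecs d (ls.dropWhile (fun l => !PySem.Str.startswith l ">")) := by
  induction ls with
  | nil => intro d acc; simp [pvFinish, pvAddSeq, pvRecs_nil]
  | cons l t ih =>
    intro d acc
    cases h : PySem.Str.startswith l ">" with
    | true =>
      rw [List.foldl_cons, pvStepA_header h]
      simp only [pvAddSeq]
      rw [pvMain, List.dropWhile_cons]
      simp only [h, Bool.not_true, Bool.false_eq_true, reduceIte, pvRecs_cons,
        List.nil_append]
    | false =>
      rw [List.foldl_cons, pvStepA_body h, List.dropWhile_cons]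
      rw [ih]
      simp only [h, Bool.not_false, reduceIte]

-- ===== VERDICT (by name: the statement is the Claim_ definition above) =====
theorem load_seqs_spec : Claim_equal_load_seqs := by
  intro infasta _
  show (pvFinish (infasta.foldl pvStepA (PySem.Dict.empty, none, []))).items =
    load_seqs_alt infasta
  unfold load_seqs_alt
  exact congrArg PySem.Dict.items (pvPrologue infasta PySem.Dict.empty [])
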